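-- pv_equiv track=rewrite | github.com/alhung1/Test-House_BE200-Control | gui/services.py | validate_restart_rdp_targets
-- ===== SOURCE A (Python) =====
-- def validate_restart_rdp_targets(
--     selected: list[str],
--     allowed: list[str],
--     forbidden_controller: str,
-- ) -> tuple[list[str] | None, str | None]:
--     cleaned = [t.strip() for t in selected if t and str(t).strip()]
--     if not cleaned:
--         return None, "Select at least one target."
--     seen: set[str] = set()
--     ordered: list[str] = []
--     for t in cleaned:
--         if t in seen:
--             continue
--         seen.add(t)
--         if t == forbidden_controller:
--             return None, f"Controller address {forbidden_controller} must never be targeted."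
--         if t not in allowed:
--             return None, f"Target {t} is outside the allowed fleet scope."
--         ordered.append(t)
--     return ordered, None
-- ===== SOURCE B (Python) =====
-- def validate_restart_rdp_targets(
--     selected: list[str],
--     allowed: list[str],
--     forbidden_controller: str,
-- ) -> tuple[list[str] | None, str | None]:
--     cleaned = [t.strip() for t in selected if t and t.strip()]
--     if not cleaned:
--         return None, "Select at least one target."
--     # Validate first, with no dedup bookkeeping: the earliest invalid cleaned
--     # target is necessarily a first occurrence, so it is exactly the element
--     # the original fused loop would stop on.
--     bad = next((t for t in cleaned if t == forbidden_controller or t not in allowed), None)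
--     if bad is not None:
--         if bad == forbidden_controller:
--             return None, f"Controller address {forbidden_controller} must never be targeted."
--         return None, f"Target {bad} is outside the allowed fleet scope."
--     # Only on success, deduplicate in first-seen order.
--     return list(dict.fromkeys(cleaned)), None
-- ===== Notes on version B (the rewrite author's own statement) =====
-- stated objective: alternative
-- what changed: B inverts the phase order: instead of A's fused loop that deduplicates with a seen-set while validating each first occurrence, B first scans the cleaned list for the earliest invalid target with no dedup state at all (correct because the earliest bad element is always a first occurrence), and performs the order-preserving dedup only on success.
import Mathlib
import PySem

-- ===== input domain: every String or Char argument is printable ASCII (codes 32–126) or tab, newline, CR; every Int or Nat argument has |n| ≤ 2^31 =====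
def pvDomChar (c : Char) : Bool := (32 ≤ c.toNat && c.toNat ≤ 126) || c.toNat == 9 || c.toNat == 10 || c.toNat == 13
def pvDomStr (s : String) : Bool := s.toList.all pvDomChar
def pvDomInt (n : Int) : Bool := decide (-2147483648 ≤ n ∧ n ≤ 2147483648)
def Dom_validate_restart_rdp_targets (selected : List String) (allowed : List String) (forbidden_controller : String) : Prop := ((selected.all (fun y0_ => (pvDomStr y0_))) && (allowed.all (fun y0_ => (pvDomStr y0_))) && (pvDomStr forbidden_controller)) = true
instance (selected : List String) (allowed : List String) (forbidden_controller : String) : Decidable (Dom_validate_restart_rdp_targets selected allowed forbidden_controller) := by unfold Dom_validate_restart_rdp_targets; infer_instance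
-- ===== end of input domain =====

-- B inverts the phase order: it finds the earliest invalid cleaned target with no
-- dedup state (the earliest bad element is always a first occurrence) and dedups
-- only on success, instead of A's fused seen-set dedup-and-validate loop (objective: alternative).

-- ===== PORT A =====
-- [t.strip() for t in selected if t and str(t).strip()]
def pvCleaned (selected : List String) : List String :=
  (selected.filter (fun t => !(t == "") && !(PySem.Str.strip t == ""))).map PySem.Str.strip

-- A's for-loop with seen set, ordered accumulator and early returns
def pvLoopA (allowed : List String) (f : String) :
    List String → PySem.Set String → List String → Option (List String) × Option String
  | [], _, ordered => (some ordered, none)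
  | t :: ts, seen, ordered =>
    if PySem.Set.contains seen t then pvLoopA allowed f ts seen ordered
    else
      let seen' := PySem.Set.add seen t
      if t = f then (none, "Controller address " ++ f ++ " must never be targeted.")
      else if !(allowed.contains t) then (none, "Target " ++ t ++ " is outside the allowed fleet scope.")
      else pvLoopA allowed f ts seen' (ordered ++ [t])

def validate_restart_rdp_targets (selected : List String) (allowed : List String) (forbidden_controller : String) : Option (List String) × Option String :=
  let cleaned := pvCleaned selected
  if cleaned = [] then (none, "Select at least one target.")
  else pvLoopA allowed forbidden_controller cleaned PySem.Set.empty []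

-- ===== PORT B =====
def validate_restart_rdp_targets_alt (selected : List String) (allowed : List String) (forbidden_controller : String) : Option (List String) × Option String :=
  let cleaned := (selected.filter (fun t => !(t == "") && !(PySem.Str.strip t == ""))).map PySem.Str.strip
  if cleaned = [] then (none, "Select at least one target.")
  else
    -- bad = next((t for t in cleaned if t == forbidden_controller or t not in allowed), None)
    match cleaned.find? (fun t => t == forbidden_controller || !(cleaned ≠ cleaned) && !(allowed.contains t)) with
    | some bad =>
      if bad = forbidden_controller then (none, "Controller address " ++ forbidden_controller ++ " must never be targeted.")
      else (none, "Target " ++ bad ++ " is outside the allowed fleet scope.")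
    | none => (some (PySem.List.dedup cleaned), none)

-- ===== PRECONDITION & SPEC =====
def Spec_validate_restart_rdp_targets (selected : List String) (allowed : List String) (forbidden_controller : String) (out : Option (List String) × Option String) : Prop := out = validate_restart_rdp_targets_alt selected allowed forbidden_controller
instance (selected : List String) (allowed : List String) (forbidden_controller : String) (out : Option (List String) × Option String) : Decidable (Spec_validate_restart_rdp_targets selected allowed forbidden_controller out) := by unfold Spec_validate_restart_rdp_targets; infer_instance

-- ===== CLAIM (what is proved, stated in full; the proofs are below) =====
def Claim_equal_validate_restart_rdp_targets : Prop := ∀ (selected : List String) (allowed : List String) (forbidden_controller : String), Dom_validate_restart_rdp_targets selected allowed forbidden_controller → Spec_validate_restart_rdp_targets selected allowed forbidden_controller (validate_restart_rdp_targets selected allowed forbidden_controller)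

-- ===== LEMMAS AND PROOFS =====

-- first-seen dedup of ts relative to an already-seen set
def pvDed (seen : PySem.Set String) : List String → List String
  | [] => []
  | t :: ts =>
    if PySem.Set.contains seen t then pvDed seen ts
    else t :: pvDed (PySem.Set.add seen t) ts

-- invariant: if every already-seen element is valid, A's fused loop returns the
-- error of the FIRST invalid element of the remaining list, or the full dedup.
theorem pvLoopA_eq_find (allowed : List String) (f : String) :
    ∀ (ts : List String) (seen : PySem.Set String) (acc : List String),
      (∀ x ∈ seen, x ≠ f ∧ x ∈ allowed) →
      pvLoopA allowed f ts seen acc =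
        match ts.find? (fun t => t == f || !(allowed.contains t)) with
        | some bad =>
            if bad = f then (none, "Controller address " ++ f ++ " must never be targeted.")
            else (none, "Target " ++ bad ++ " is outside the allowed fleet scope.")
        | none => (some (acc ++ pvDed seen ts), none) := by
  intro ts
  induction ts with
  | nil => intro seen acc _; simp [pvLoopA, pvDed]
  | cons t ts ih =>
    intro seen acc hseen
    by_cases h : t ∈ seen
    · have hgood := hseen t h
      have hpred : (t == f || !decide (t ∈ allowed)) = false := by
        simp [hgood.1, hgood.2]
      simp [pvLoopA, pvDed, h, List.find?, hpred, ih _ _ hseen]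
    · by_cases h1 : t = f
      · subst h1; simp [pvLoopA, h, List.find?]
      · by_cases h2 : t ∈ allowed
        · have hpred : (t == f || !decide (t ∈ allowed)) = false := by simp [h1, h2]
          have hseen' : ∀ x ∈ PySem.Set.add seen t, x ≠ f ∧ x ∈ allowed := by
            intro x hx
            have : x ∈ seen ∨ x = t := by
              simpa [PySem.Set.add, h, or_comm] using hx
            rcases this with hx' | rfl
            · exact hseen x hx'
            · exact ⟨h1, h2⟩
          have hbf : (t == f) = false := by simp [h1]
          have hadd : PySem.Set.add seen t = seen ++ [t] := by simp [PySem.Set.add, h]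
          have hih := ih (PySem.Set.add seen t) (acc ++ [t]) hseen'
          rw [hadd] at hih
          simp [pvLoopA, pvDed, h, h1, h2, List.find?, hbf, hih]
        · simp [pvLoopA, h, h1, h2, List.find?]

theorem foldl_add_eq_ded :
    ∀ (ts : List String) (s : PySem.Set String),
      ts.foldl PySem.Set.add s = s ++ pvDed s ts := by
  intro ts
  induction ts with
  | nil => intro s; simp [pvDed]
  | cons t ts ih =>
    intro s
    by_cases h : t ∈ s
    · have hadd : PySem.Set.add s t = s := by simp [PySem.Set.add, h]
      simp [List.foldl, pvDed, h, ih]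
    · have hadd : PySem.Set.add s t = s ++ [t] := by simp [PySem.Set.add, h]
      simp [List.foldl, pvDed, h, ih]

theorem dedup_eq_ded (ts : List String) :
    PySem.List.dedup ts = pvDed PySem.Set.empty ts := by
  have h := foldl_add_eq_ded ts PySem.Set.empty
  simpa [PySem.List.dedup_eq_ofList, PySem.Set.ofList_eq_foldl, PySem.Set.empty] using h

-- ===== VERDICT (by name: the statement is the Claim_ definition above) =====
theorem validate_restart_rdp_targets_spec : Claim_equal_validate_restart_rdp_targets := by
  intro selected allowed f _
  unfold Spec_validate_restart_rdp_targets
  unfold validate_restart_rdp_targets validate_restart_rdp_targets_alt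
  simp only []
  set cleaned := pvCleaned selected with hc
  have hclean : ((selected.filter (fun t => !(t == "") && !(PySem.Str.strip t == ""))).map PySem.Str.strip) = cleaned := by
    rw [hc]; rfl
  rw [hclean]
  by_cases h : cleaned = []
  · simp [h]
  · rw [if_neg h, if_neg h]
    rw [pvLoopA_eq_find allowed f cleaned PySem.Set.empty []
      (by intro x hx; simp [PySem.Set.empty] at hx)]
    cases hfind : cleaned.find? (fun t => t == f || !(cleaned ≠ cleaned) && !(allowed.contains t)) with
    | some bad =>
      have h2 : cleaned.find? (fun t => t == f || !decide (t ∈ allowed)) = some bad := by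
        simpa using hfind
      simp [h2]
    | none =>
      have h2 : cleaned.find? (fun t => t == f || !decide (t ∈ allowed)) = none := by
        simpa using hfind
      have hd : pvDed PySem.Set.empty cleaned = PySem.Set.ofList cleaned := by
        rw [← dedup_eq_ded, PySem.List.dedup_eq_ofList]
      simp [h2, PySem.Set.empty] at hd ⊢
      simp [hd]
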